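-- pv_equiv track=rewrite | github.com/AaravGKamat/CSE331 | HW0/HW0Python/Solution.py | row_create
-- ===== SOURCE A (Python) =====
-- def row_create(zeroes, rows):
--     result = []
--     for i in range(0, rows):
--         if (zeroes > 0):
--             result.append(0)
--         else:
--             result.append(1)
--         zeroes = zeroes-1
--     return result
-- ===== SOURCE B (Python) =====
-- def row_create(zeroes, rows):
--     n0 = max(0, min(zeroes, rows))
--     return [0] * n0 + [1] * (rows - n0)
-- ===== Notes on version B (the rewrite author's own statement) =====
-- stated objective: idiomatic
-- what changed: Replaces the per-element loop with a decrementing counter by a closed-form clamped count of zeros plus list repetition/concatenation.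
import Mathlib
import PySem

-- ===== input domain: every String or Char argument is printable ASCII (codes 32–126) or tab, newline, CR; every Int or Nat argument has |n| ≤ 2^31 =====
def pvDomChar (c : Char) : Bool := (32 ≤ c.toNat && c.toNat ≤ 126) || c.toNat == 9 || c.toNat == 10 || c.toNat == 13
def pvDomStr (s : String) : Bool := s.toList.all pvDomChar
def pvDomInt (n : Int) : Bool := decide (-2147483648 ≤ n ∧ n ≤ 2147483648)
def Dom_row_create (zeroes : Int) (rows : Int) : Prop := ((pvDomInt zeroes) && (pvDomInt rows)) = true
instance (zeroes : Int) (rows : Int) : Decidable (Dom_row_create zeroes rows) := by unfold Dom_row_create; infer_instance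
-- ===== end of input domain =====

-- B replaces A's per-element loop by a closed-form clamped zero count plus list repetition (idiomatic; same cost).

-- ===== PORT A =====
-- the for-loop over range(0, rows): iterates rows.toNat times, appending 0 while zeroes > 0 else 1, then decrementing zeroes
def row_create_loop (n : Nat) (zeroes : Int) (result : List Int) : List Int :=
  match n with
  | 0 => result
  | Nat.succ m => row_create_loop m (zeroes - 1) (result ++ [if zeroes > 0 then 0 else 1])

def row_create (zeroes : Int) (rows : Int) : List Int :=
  row_create_loop rows.toNat zeroes []

-- ===== PORT B =====
def row_create_alt (zeroes : Int) (rows : Int) : List Int :=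
  let n0 : Int := max 0 (min zeroes rows)
  List.replicate n0.toNat 0 ++ List.replicate (rows - n0).toNat 1

-- ===== PRECONDITION & SPEC =====
def Spec_row_create (zeroes : Int) (rows : Int) (out : List Int) : Prop := out = row_create_alt zeroes rows
instance (zeroes : Int) (rows : Int) (out : List Int) : Decidable (Spec_row_create zeroes rows out) := by unfold Spec_row_create; infer_instance

-- ===== CLAIM (what is proved, stated in full; the proofs are below) =====
def Claim_equal_row_create : Prop := ∀ (zeroes : Int) (rows : Int), Dom_row_create zeroes rows → Spec_row_create zeroes rows (row_create zeroes rows)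

-- ===== LEMMAS AND PROOFS =====

-- the loop appends min(z⁺, n) zeros then the remaining ones
theorem row_create_loop_eq (n : Nat) (z : Int) (acc : List Int) :
    row_create_loop n z acc =
      acc ++ List.replicate (min z.toNat n) 0 ++ List.replicate (n - min z.toNat n) 1 := by
  induction n generalizing z acc with
  | zero => simp [row_create_loop]
  | succ m ih =>
    rw [row_create_loop, ih]
    by_cases hz : z > 0
    · have h1 : z.toNat = (z - 1).toNat + 1 := by omega
      have h2 : min z.toNat (m + 1) = min (z - 1).toNat m + 1 := by omega
      have h3 : m + 1 - (min (z - 1).toNat m + 1) = m - min (z - 1).toNat m := by omega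
      simp only [if_pos hz, h2, h3, List.replicate_succ, List.append_assoc, List.cons_append,
        List.nil_append]
    · have h1 : z.toNat = 0 := by omega
      have h2 : (z - 1).toNat = 0 := by omega
      simp only [if_neg hz, h1, h2, Nat.zero_min, List.replicate_zero, Nat.sub_zero,
        List.replicate_succ, List.append_assoc, List.nil_append, List.cons_append]

-- ===== VERDICT (by name: the statement is the Claim_ definition above) =====
theorem row_create_spec : Claim_equal_row_create := by
  intro z r _
  unfold Spec_row_create row_create row_create_alt
  rw [row_create_loop_eq]
  have h1 : (max 0 (min z r)).toNat = min z.toNat r.toNat := by omega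
  have h2 : (r - max 0 (min z r)).toNat = r.toNat - min z.toNat r.toNat := by omega
  simp [h1, h2]
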